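-- pv_equiv track=rewrite | github.com/ArnoldTafataona/fragment | tests/old.fragment.02/core.py | pht_one
-- ===== SOURCE A (Python) =====
-- def add(x=int, y=int) -> int:
--     return (x + y) % pow(2, 32)
--
-- def pht_one(data: list, iterations: int = 4) -> list:
--     for _ in range(iterations):
--         data[0] = add(x=data[0], y=data[1])
--         data[1] = add(x=data[1], y=(2 * data[0]))
--         data[2] = add(x=data[2], y=data[3])
--         data[3] = add(x=data[3], y=(2 * data[2]))
--
--         data = [
--             data[1],
--             data[2],
--             data[3],
--             data[0],
--         ]
--
--     return data
-- ===== SOURCE B (Python) =====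
-- _MOD = 2 ** 32
--
-- # One round is the linear map (a,b,c,d) -> (2a+3b, c+d, 2c+3d, a+b) over Z/2^32,
-- # so the whole function is that 4x4 matrix raised to `iterations` (fast squaring).
-- _M = ((2, 3, 0, 0),
--       (0, 0, 1, 1),
--       (0, 0, 2, 3),
--       (1, 1, 0, 0))
--
-- _I = ((1, 0, 0, 0),
--      (0, 1, 0, 0),
--      (0, 0, 1, 0),
--      (0, 0, 0, 1))
--
--
-- def _mat_mul(A, B):
--     return tuple(
--         tuple(sum(A[i][k] * B[k][j] for k in range(4)) % _MOD for j in range(4))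
--         for i in range(4)
--     )
--
--
-- def _mat_pow(P, k):
--     if k == 0:
--         return _I
--     h = _mat_pow(P, k // 2)
--     hh = _mat_mul(h, h)
--     return hh if k % 2 == 0 else _mat_mul(hh, P)
--
--
-- def pht_one(data: list, iterations: int = 4) -> list:
--     if iterations <= 0:
--         return data
--     v = (data[0], data[1], data[2], data[3])
--     P = _mat_pow(_M, iterations)
--     return [(r[0] * v[0] + r[1] * v[1] + r[2] * v[2] + r[3] * v[3]) % _MOD for r in P]
-- ===== Notes on version B (the rewrite author's own statement) =====
-- stated objective: faster
-- what changed: One round is a fixed linear map on (d0,d1,d2,d3) over Z/2^32, so B replaces A's per-iteration loop by raising the 4x4 round matrix to the power `iterations` with fast squaring and applying it once.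
import Mathlib
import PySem

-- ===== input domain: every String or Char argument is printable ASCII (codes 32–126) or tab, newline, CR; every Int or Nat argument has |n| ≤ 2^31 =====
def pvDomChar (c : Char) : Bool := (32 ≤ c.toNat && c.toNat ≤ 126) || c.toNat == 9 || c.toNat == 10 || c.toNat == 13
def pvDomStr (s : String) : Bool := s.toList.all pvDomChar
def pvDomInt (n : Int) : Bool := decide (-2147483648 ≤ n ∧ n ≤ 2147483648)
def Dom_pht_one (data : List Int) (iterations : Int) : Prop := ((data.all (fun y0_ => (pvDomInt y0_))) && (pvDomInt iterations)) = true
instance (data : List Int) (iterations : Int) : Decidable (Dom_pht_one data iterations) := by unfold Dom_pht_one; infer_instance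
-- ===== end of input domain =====

-- B replaces A's per-iteration loop by fast exponentiation of the 4x4 round matrix mod 2^32
-- (objective: faster, O(log iterations) vs O(iterations)).
-- Note: Python A mutates the caller's list in place during the first iteration; equivalence here is about the RETURN value only.

-- ===== PORT A =====

-- add(x, y) = (x + y) % 2**32
def pvAdd (x y : Int) : Int := PySem.Int.mod (x + y) (2 ^ 32)

-- data[i]; Pre_ guarantees the index is in range wherever this is used
def pvGetI (xs : List Int) (i : Int) : Int := (PySem.List.pyGet? xs i).getD 0

-- one iteration of A's loop body (the four in-place assignments, then the rebuilt 4-list)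
def phtStep (data : List Int) : List Int :=
  let d0 := pvAdd (pvGetI data 0) (pvGetI data 1)
  let d1 := pvAdd (pvGetI data 1) (2 * d0)
  let d2 := pvAdd (pvGetI data 2) (pvGetI data 3)
  let d3 := pvAdd (pvGetI data 3) (2 * d2)
  [d1, d2, d3, d0]

-- range(iterations) runs max(iterations, 0) times
def pht_one (data : List Int) (iterations : Int) : List Int :=
  (List.range iterations.toNat).foldl (fun d _ => phtStep d) data

-- ===== PORT B =====

structure Mat4 where
  a00 : Int
  a01 : Int
  a02 : Int
  a03 : Int
  a10 : Int
  a11 : Int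
  a12 : Int
  a13 : Int
  a20 : Int
  a21 : Int
  a22 : Int
  a23 : Int
  a30 : Int
  a31 : Int
  a32 : Int
  a33 : Int
deriving DecidableEq, Repr

-- the round matrix _M of Source B
def pvM : Mat4 := ⟨2, 3, 0, 0, 0, 0, 1, 1, 0, 0, 2, 3, 1, 1, 0, 0⟩

-- the identity matrix _I of Source B
def pvI : Mat4 := ⟨1, 0, 0, 0, 0, 1, 0, 0, 0, 0, 1, 0, 0, 0, 0, 1⟩

-- _mat_mul: entrywise sum of products, reduced mod 2**32
def pvMatMul (A B : Mat4) : Mat4 :=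
  ⟨(PySem.Int.mod (A.a00 * B.a00 + A.a01 * B.a10 + A.a02 * B.a20 + A.a03 * B.a30) (2 ^ 32)),
    (PySem.Int.mod (A.a00 * B.a01 + A.a01 * B.a11 + A.a02 * B.a21 + A.a03 * B.a31) (2 ^ 32)),
    (PySem.Int.mod (A.a00 * B.a02 + A.a01 * B.a12 + A.a02 * B.a22 + A.a03 * B.a32) (2 ^ 32)),
    (PySem.Int.mod (A.a00 * B.a03 + A.a01 * B.a13 + A.a02 * B.a23 + A.a03 * B.a33) (2 ^ 32)),
    (PySem.Int.mod (A.a10 * B.a00 + A.a11 * B.a10 + A.a12 * B.a20 + A.a13 * B.a30) (2 ^ 32)),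
    (PySem.Int.mod (A.a10 * B.a01 + A.a11 * B.a11 + A.a12 * B.a21 + A.a13 * B.a31) (2 ^ 32)),
    (PySem.Int.mod (A.a10 * B.a02 + A.a11 * B.a12 + A.a12 * B.a22 + A.a13 * B.a32) (2 ^ 32)),
    (PySem.Int.mod (A.a10 * B.a03 + A.a11 * B.a13 + A.a12 * B.a23 + A.a13 * B.a33) (2 ^ 32)),
    (PySem.Int.mod (A.a20 * B.a00 + A.a21 * B.a10 + A.a22 * B.a20 + A.a23 * B.a30) (2 ^ 32)),
    (PySem.Int.mod (A.a20 * B.a01 + A.a21 * B.a11 + A.a22 * B.a21 + A.a23 * B.a31) (2 ^ 32)),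
    (PySem.Int.mod (A.a20 * B.a02 + A.a21 * B.a12 + A.a22 * B.a22 + A.a23 * B.a32) (2 ^ 32)),
    (PySem.Int.mod (A.a20 * B.a03 + A.a21 * B.a13 + A.a22 * B.a23 + A.a23 * B.a33) (2 ^ 32)),
    (PySem.Int.mod (A.a30 * B.a00 + A.a31 * B.a10 + A.a32 * B.a20 + A.a33 * B.a30) (2 ^ 32)),
    (PySem.Int.mod (A.a30 * B.a01 + A.a31 * B.a11 + A.a32 * B.a21 + A.a33 * B.a31) (2 ^ 32)),
    (PySem.Int.mod (A.a30 * B.a02 + A.a31 * B.a12 + A.a32 * B.a22 + A.a33 * B.a32) (2 ^ 32)),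
    (PySem.Int.mod (A.a30 * B.a03 + A.a31 * B.a13 + A.a32 * B.a23 + A.a33 * B.a33) (2 ^ 32))⟩

-- _mat_pow: fast exponentiation by repeated squaring
def pvMatPow (P : Mat4) (k : Nat) : Mat4 :=
  if h : k = 0 then pvI
  else
    let half := pvMatPow P (k / 2)
    let hh := pvMatMul half half
    if k % 2 = 0 then hh else pvMatMul hh P
termination_by k
decreasing_by exact Nat.div_lt_self (Nat.pos_of_ne_zero h) one_lt_two

-- the final list comprehension: each row of P dotted with v, mod 2**32
def pvApplyRow (r0 r1 r2 r3 : Int) (v : Int × Int × Int × Int) : Int :=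
  PySem.Int.mod (r0 * v.1 + r1 * v.2.1 + r2 * v.2.2.1 + r3 * v.2.2.2) (2 ^ 32)

-- data[i] on B's side (Source B's v = (data[0], data[1], data[2], data[3]))
def pvGetB (xs : List Int) (i : Int) : Int := (PySem.List.pyGet? xs i).getD 0

def pht_one_alt (data : List Int) (iterations : Int) : List Int :=
  if iterations ≤ 0 then data
  else
    let v := (pvGetB data 0, pvGetB data 1, pvGetB data 2, pvGetB data 3)
    let P := pvMatPow pvM iterations.toNat
    [pvApplyRow P.a00 P.a01 P.a02 P.a03 v,
     pvApplyRow P.a10 P.a11 P.a12 P.a13 v,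
     pvApplyRow P.a20 P.a21 P.a22 P.a23 v,
     pvApplyRow P.a30 P.a31 P.a32 P.a33 v]

-- ===== PRECONDITION & SPEC =====

-- Pre_ excludes exactly the inputs on which A raises IndexError: a positive
-- iteration count with fewer than four list elements.
def Pre_pht_one (data : List Int) (iterations : Int) : Prop :=
  iterations ≤ 0 ∨ 4 ≤ data.length
instance (data : List Int) (iterations : Int) : Decidable (Pre_pht_one data iterations) := by
  unfold Pre_pht_one; infer_instance

def pvWitness_pht_one : List Int × Int := ([1, 2, 3, 4], 4)

def Spec_pht_one (data : List Int) (iterations : Int) (out : List Int) : Prop := out = pht_one_alt data iterations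
instance (data : List Int) (iterations : Int) (out : List Int) : Decidable (Spec_pht_one data iterations out) := by unfold Spec_pht_one; infer_instance

-- ===== CLAIM (what is proved, stated in full; the proofs are below) =====
def Claim_equal_pht_one : Prop := ∀ (data : List Int) (iterations : Int), Dom_pht_one data iterations → Pre_pht_one data iterations → Spec_pht_one data iterations (pht_one data iterations)

-- ===== LEMMAS AND PROOFS =====

-- abbreviations for the proof
abbrev pvV4 := Int × Int × Int × Int

def pvToL (w : pvV4) : List Int := [w.1, w.2.1, w.2.2.1, w.2.2.2]

-- A's step on a 4-tuple, using plain emod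
def stepV (v : pvV4) : pvV4 :=
  let d0 := (v.1 + v.2.1) % 4294967296
  let d1 := (v.2.1 + 2 * d0) % 4294967296
  let d2 := (v.2.2.1 + v.2.2.2) % 4294967296
  let d3 := (v.2.2.2 + 2 * d2) % 4294967296
  (d1, d2, d3, d0)

def redV (v : pvV4) : pvV4 :=
  (v.1 % 4294967296, v.2.1 % 4294967296, v.2.2.1 % 4294967296, v.2.2.2 % 4294967296)

def pvApply (P : Mat4) (v : pvV4) : pvV4 :=
  (pvApplyRow P.a00 P.a01 P.a02 P.a03 v,
   pvApplyRow P.a10 P.a11 P.a12 P.a13 v,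
   pvApplyRow P.a20 P.a21 P.a22 P.a23 v,
   pvApplyRow P.a30 P.a31 P.a32 P.a33 v)

theorem pvMod_eq (x : Int) : PySem.Int.mod x (2 ^ 32) = x % 4294967296 := by
  rw [PySem.Int.mod_eq_emod_of_pos (by norm_num)]; norm_num

theorem emod_congr {x y : Int} (h : (x : ZMod 4294967296) = y) :
    x % 4294967296 = y % 4294967296 := by
  have h2 : x ≡ y [ZMOD (4294967296 : ℕ)] := (ZMod.intCast_eq_intCast_iff x y _).mp h
  simpa using h2

theorem zc (x : Int) : ((x % 4294967296 : Int) : ZMod 4294967296) = (x : ZMod 4294967296) := by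
  have h : ((4294967296 : ℕ) : ℤ) = 4294967296 := by norm_num
  rw [← h, ZMod.intCast_mod]

theorem apply_mul (A B : Mat4) (v : pvV4) :
    pvApply (pvMatMul A B) v = pvApply A (pvApply B v) := by
  simp only [pvApply, pvApplyRow, pvMatMul, pvMod_eq, Prod.mk.injEq]
  refine ⟨?_, ?_, ?_, ?_⟩ <;> (apply emod_congr; push_cast [zc]; ring)

theorem apply_M (v : pvV4) : pvApply pvM v = stepV v := by
  simp only [pvApply, pvApplyRow, pvM, stepV, pvMod_eq, Prod.mk.injEq]
  refine ⟨?_, ?_, ?_, ?_⟩ <;> omega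

theorem apply_I (v : pvV4) : pvApply pvI v = redV v := by
  simp only [pvApply, pvApplyRow, pvI, redV, pvMod_eq, Prod.mk.injEq]
  refine ⟨?_, ?_, ?_, ?_⟩ <;> omega

theorem red_step (v : pvV4) : redV (stepV v) = stepV v := by
  simp only [redV, stepV, Prod.mk.injEq]
  refine ⟨?_, ?_, ?_, ?_⟩ <;> omega

theorem apply_pow (k : Nat) (v : pvV4) :
    pvApply (pvMatPow pvM k) v = if k = 0 then redV v else stepV^[k] v := by
  induction k using Nat.strong_induction_on generalizing v with
  | _ k ih =>
    rw [pvMatPow]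
    by_cases h0 : k = 0
    · simp [h0, apply_I]
    · have hlt : k / 2 < k := Nat.div_lt_self (Nat.pos_of_ne_zero h0) one_lt_two
      rw [dif_neg h0, if_neg h0]
      by_cases he : k % 2 = 0
      · -- even: k = k/2 + k/2, and k/2 ≠ 0
        have hh : k / 2 ≠ 0 := by omega
        rw [if_pos he, apply_mul, ih _ hlt, ih _ hlt, if_neg hh, if_neg hh,
          ← Function.iterate_add_apply]
        congr 1; omega
      · rw [if_neg he, apply_mul, apply_mul, apply_M, ih _ hlt, ih _ hlt]
        by_cases hh : k / 2 = 0
        · have hk1 : k = 1 := by omega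
          simp [red_step, hk1]
        · rw [if_neg hh, if_neg hh, ← Function.iterate_add_apply,
            ← Function.iterate_succ_apply]
          congr 1; omega

theorem getB_eq_getI (xs : List Int) (i : Int) : pvGetB xs i = pvGetI xs i := rfl

theorem getI_cons (a b c d : Int) (rest : List Int) :
    pvGetI (a :: b :: c :: d :: rest) 0 = a ∧ pvGetI (a :: b :: c :: d :: rest) 1 = b ∧
    pvGetI (a :: b :: c :: d :: rest) 2 = c ∧ pvGetI (a :: b :: c :: d :: rest) 3 = d := by
  refine ⟨?_, ?_, ?_, ?_⟩
  · rw [pvGetI, show (0:Int) = ((0:Nat):Int) from rfl,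
      PySem.List.pyGet?_ofNat _ _ (by simp)]; simp
  · rw [pvGetI, show (1:Int) = ((1:Nat):Int) from rfl,
      PySem.List.pyGet?_ofNat _ _ (by simp)]; simp
  · rw [pvGetI, show (2:Int) = ((2:Nat):Int) from rfl,
      PySem.List.pyGet?_ofNat _ _ (by simp)]; simp
  · rw [pvGetI, show (3:Int) = ((3:Nat):Int) from rfl,
      PySem.List.pyGet?_ofNat _ _ (by simp)]; simp

theorem step_cons (a b c d : Int) (rest : List Int) :
    phtStep (a :: b :: c :: d :: rest) = pvToL (stepV (a, b, c, d)) := by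
  obtain ⟨h0, h1, h2, h3⟩ := getI_cons a b c d rest
  simp [phtStep, pvAdd, pvToL, stepV, h0, h1, h2, h3]

theorem step_toL (w : pvV4) : phtStep (pvToL w) = pvToL (stepV w) := by
  obtain ⟨a, b, c, d⟩ := w
  exact step_cons a b c d []

theorem iterate_cons (k : Nat) (a b c d : Int) (rest : List Int) :
    phtStep^[k + 1] (a :: b :: c :: d :: rest) = pvToL (stepV^[k + 1] (a, b, c, d)) := by
  induction k with
  | zero => simpa using step_cons a b c d rest
  | succ j ihj =>
    rw [Function.iterate_succ_apply' phtStep (j + 1), ihj, step_toL,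
      ← Function.iterate_succ_apply' stepV (j + 1)]

theorem foldl_range (k : Nat) (d : List Int) :
    (List.range k).foldl (fun d _ => phtStep d) d = phtStep^[k] d := by
  induction k generalizing d with
  | zero => rfl
  | succ j ihj =>
    rw [List.range_succ, List.foldl_append, ihj, Function.iterate_succ_apply']
    rfl

-- ===== VERDICT (by name: the statement is the Claim_ definition above) =====
theorem pht_one_spec : Claim_equal_pht_one := by
  intro data iterations _ hpre
  unfold Spec_pht_one pht_one pht_one_alt
  by_cases hle : iterations ≤ 0
  · have : iterations.toNat = 0 := Int.toNat_of_nonpos hle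
    simp [this, hle]
  · have hlen : 4 ≤ data.length := by
      rcases hpre with h | h
      · exact absurd h hle
      · exact h
    obtain ⟨a, b, c, d, rest, rfl⟩ : ∃ a b c d rest, data = a :: b :: c :: d :: rest := by
      match data, hlen with
      | a :: b :: c :: d :: rest, _ => exact ⟨a, b, c, d, rest, rfl⟩
    obtain ⟨k, hk⟩ : ∃ k : Nat, iterations.toNat = k + 1 := by
      have : 0 < iterations.toNat := by omega
      exact ⟨iterations.toNat - 1, by omega⟩
    rw [foldl_range, hk, iterate_cons]
    rw [if_neg hle]
    obtain ⟨h0, h1, h2, h3⟩ := getI_cons a b c d rest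
    simp only [getB_eq_getI, h0, h1, h2, h3]
    have := apply_pow (k + 1) (a, b, c, d)
    rw [if_neg (Nat.succ_ne_zero k)] at this
    rw [← this]
    rfl
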